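-- pv_equiv track=rewrite | github.com/nikunjpanchal22/code_clone_classification | python_t1_t2_full/Gpt_false_pair_233.py | get_most_ooo_word
-- ===== SOURCE A (Python) =====
-- def get_most_ooo_word(words) :
--     words = words.split()
--     most = [words[0]]
--     for word in words[1:] :
--         if word.count('o') > most[0].count('o') :
--             most = [word]
--         elif word.count('o') == most[0].count('o') :
--             most.append(word)
--     most_words = ' '.join(most)
--     return most_words
-- ===== SOURCE B (Python) =====
-- def get_most_ooo_word(words):
--     ws = words.split()
--     m = max(w.count('o') for w in ws)
--     return ' '.join(w for w in ws if w.count('o') == m)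
-- ===== Notes on version B (the rewrite author's own statement) =====
-- stated objective: simpler
-- what changed: Two-pass max-then-filter (compute the maximal 'o'-count, then keep the words attaining it) instead of A's single running-max pass with a reset/append accumulator list.
import Mathlib
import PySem

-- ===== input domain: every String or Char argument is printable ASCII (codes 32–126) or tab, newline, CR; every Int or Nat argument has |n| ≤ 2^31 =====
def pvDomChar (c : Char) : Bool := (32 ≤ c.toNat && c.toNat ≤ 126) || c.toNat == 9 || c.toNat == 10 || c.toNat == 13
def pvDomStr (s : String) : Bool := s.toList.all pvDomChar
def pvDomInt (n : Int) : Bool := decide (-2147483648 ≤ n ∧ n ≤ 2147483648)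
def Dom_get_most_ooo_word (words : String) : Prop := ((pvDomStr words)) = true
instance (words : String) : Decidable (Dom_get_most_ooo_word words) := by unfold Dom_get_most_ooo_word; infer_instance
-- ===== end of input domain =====

-- B replaces A's single running-max pass (reset/append accumulator list) with a two-pass
-- max-then-filter; objective: simpler.

-- ===== PORT A =====
def get_most_ooo_word (words : String) : String :=
  let ws := PySem.Str.split₀ words
  match ws with
  | [] => ""  -- Python: words[0] raises IndexError here; excluded by Pre_
  | w0 :: _ =>
    let most := (PySem.List.slice ws (some 1) none).foldl
      (fun most word =>
        if PySem.Str.count most.headI "o" < PySem.Str.count word "o" then [word]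
        else if PySem.Str.count word "o" = PySem.Str.count most.headI "o" then most ++ [word]
        else most) [w0]
    PySem.Str.join " " most

-- ===== PORT B =====
def get_most_ooo_word_alt (words : String) : String :=
  let ws := PySem.Str.split₀ words
  match PySem.List.max? (ws.map (fun w => PySem.Str.count w "o")) (fun x => x) with
  | none => ""  -- Python: max() of an empty sequence raises ValueError here; excluded by Pre_
  | some m => PySem.Str.join " " (ws.filter (fun w => PySem.Str.count w "o" == m))

-- ===== PRECONDITION & SPEC =====
-- Pre_ excludes exactly the inputs with no words (empty or all-whitespace strings), on which
-- A raises IndexError (and B raises ValueError).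
def Pre_get_most_ooo_word (words : String) : Prop := PySem.Str.split₀ words ≠ []
instance (words : String) : Decidable (Pre_get_most_ooo_word words) := by unfold Pre_get_most_ooo_word; infer_instance
def pvWitness_get_most_ooo_word : String := "foo bar oo"

def Spec_get_most_ooo_word (words : String) (out : String) : Prop := out = get_most_ooo_word_alt words
instance (words : String) (out : String) : Decidable (Spec_get_most_ooo_word words out) := by unfold Spec_get_most_ooo_word; infer_instance

-- ===== CLAIM (what is proved, stated in full; the proofs are below) =====
def Claim_equal_get_most_ooo_word : Prop := ∀ (words : String), Dom_get_most_ooo_word words → Pre_get_most_ooo_word words → Spec_get_most_ooo_word words (get_most_ooo_word words)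

-- ===== LEMMAS AND PROOFS =====

-- the 'o'-count of a word
def cO (w : String) : Nat := PySem.Str.count w "o"

lemma headI_filter_count {l : List String} {M : Nat}
    (h : l.filter (fun w => cO w == M) ≠ []) :
    cO (l.filter (fun w => cO w == M)).headI = M := by
  cases hf : l.filter (fun w => cO w == M) with
  | nil => exact absurd hf h
  | cons x t =>
    have hx : x ∈ l.filter (fun w => cO w == M) := by rw [hf]; exact List.mem_cons_self
    have := List.of_mem_filter hx
    simpa using this

-- A's loop, run after a prefix 'all' whose maximal count is M, extends the filter.
lemma loopA (tail : List String) : ∀ (all : List String) (M : Nat),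
    (∃ w ∈ all, cO w = M) → (∀ w ∈ all, cO w ≤ M) →
    tail.foldl
      (fun most word =>
        if PySem.Str.count most.headI "o" < PySem.Str.count word "o" then [word]
        else if PySem.Str.count word "o" = PySem.Str.count most.headI "o" then most ++ [word]
        else most) (all.filter (fun w => cO w == M)) =
    (all ++ tail).filter (fun w => cO w == tail.foldl (fun m w => max m (cO w)) M) := by
  induction tail with
  | nil =>
    intro all M _ _
    simp
  | cons w t ih =>
    intro all M hmem hub
    have hne : all.filter (fun w => cO w == M) ≠ [] := by
      obtain ⟨v, hv, hvM⟩ := hmem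
      intro hnil
      have : v ∈ all.filter (fun w => cO w == M) := List.mem_filter.mpr ⟨hv, by simp [hvM]⟩
      simp [hnil] at this
    have hhead : cO (all.filter (fun w => cO w == M)).headI = M := headI_filter_count hne
    simp only [List.foldl_cons]
    by_cases hgt : cO ((all.filter (fun w => cO w == M)).headI) < cO w
    · rw [hhead] at hgt
      have h1 : (if PySem.Str.count (all.filter (fun w => cO w == M)).headI "o" < PySem.Str.count w "o" then [w]
          else if PySem.Str.count w "o" = PySem.Str.count (all.filter (fun w => cO w == M)).headI "o" then (all.filter (fun w => cO w == M)) ++ [w]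
          else (all.filter (fun w => cO w == M))) = [w] := by
        rw [if_pos]; show cO _ < cO w; rw [hhead]; exact hgt
      rw [h1]
      have h2 : [w] = (all ++ [w]).filter (fun v => cO v == cO w) := by
        rw [List.filter_append]
        have : all.filter (fun v => cO v == cO w) = [] := by
          apply List.filter_eq_nil_iff.mpr
          intro v hv
          have : cO v ≤ M := hub v hv
          simp; omega
        simp [this]
      rw [h2, ih (all ++ [w]) (cO w) ⟨w, by simp⟩ (by
        intro v hv
        rcases List.mem_append.mp hv with h | h
        · exact le_of_lt (lt_of_le_of_lt (hub v h) hgt)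
        · simp at h; subst h; exact le_refl _)]
      have hmax : max M (cO w) = cO w := by omega
      simp [hmax, List.append_assoc]
    · rw [hhead] at hgt
      rw [not_lt] at hgt
      by_cases heq : cO w = M
      · have h1 : (if PySem.Str.count (all.filter (fun w => cO w == M)).headI "o" < PySem.Str.count w "o" then [w]
            else if PySem.Str.count w "o" = PySem.Str.count (all.filter (fun w => cO w == M)).headI "o" then (all.filter (fun w => cO w == M)) ++ [w]
            else (all.filter (fun w => cO w == M))) = (all.filter (fun w => cO w == M)) ++ [w] := by
          rw [if_neg, if_pos]
          · show cO w = cO _; rw [hhead]; exact heq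
          · show ¬ cO _ < cO w; rw [hhead]; omega
        rw [h1]
        have h2 : (all.filter (fun v => cO v == M)) ++ [w] = (all ++ [w]).filter (fun v => cO v == M) := by
          rw [List.filter_append]; simp [heq]
        rw [h2, ih (all ++ [w]) M ⟨w, by simp, heq⟩ (by
        intro v hv
        rcases List.mem_append.mp hv with h | h
        · exact hub v h
        · simp at h; subst h; omega)]
        have hmax : max M (cO w) = M := by omega
        simp [hmax, List.append_assoc]
      · have hlt : cO w < M := lt_of_le_of_ne hgt heq
        have h1 : (if PySem.Str.count (all.filter (fun w => cO w == M)).headI "o" < PySem.Str.count w "o" then [w]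
            else if PySem.Str.count w "o" = PySem.Str.count (all.filter (fun w => cO w == M)).headI "o" then (all.filter (fun w => cO w == M)) ++ [w]
            else (all.filter (fun w => cO w == M))) = (all.filter (fun w => cO w == M)) := by
          rw [if_neg, if_neg]
          · show ¬ cO w = cO _; rw [hhead]; exact heq
          · show ¬ cO _ < cO w; rw [hhead]; omega
        rw [h1]
        have h2 : (all.filter (fun v => cO v == M)) = (all ++ [w]).filter (fun v => cO v == M) := by
          rw [List.filter_append]; simp [heq]
        rw [h2, ih (all ++ [w]) M (by obtain ⟨v, hv, hvM⟩ := hmem; exact ⟨v, by simp [hv], hvM⟩) (by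
        intro v hv
        rcases List.mem_append.mp hv with h | h
        · exact hub v h
        · simp at h; subst h; omega)]
        have hmax : max M (cO w) = M := by omega
        simp [hmax, List.append_assoc]

-- ===== VERDICT (by name: the statement is the Claim_ definition above) =====
theorem get_most_ooo_word_spec : Claim_equal_get_most_ooo_word := by
  intro words _ hpre
  unfold Spec_get_most_ooo_word get_most_ooo_word get_most_ooo_word_alt
  unfold Pre_get_most_ooo_word at hpre
  cases hws : PySem.Str.split₀ words with
  | nil => exact absurd hws hpre
  | cons w0 rest =>
    simp only [PySem.List.slice_from_one, List.tail_cons]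
    rw [show [w0] = ([w0].filter (fun w => cO w == cO w0)) by simp]
    rw [loopA rest [w0] (cO w0) ⟨w0, by simp⟩ (by simp)]
    simp only [List.map_cons]
    rw [PySem.List.max?_id_cons]
    simp only [List.foldl_map]
    rfl
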